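-- pv_equiv track=rewrite | github.com/spergel/new_finance | process_convertibles.py | extract_ticker_from_symbol
-- ===== SOURCE A (Python) =====
-- def extract_ticker_from_symbol(symbol):
--     """Extract the base ticker from symbols like 'WFC/PRL' or 'BAC/PRL'."""
--     # Handle formats like TICKER/PRX
--     if '/' in symbol:
--         return symbol.split('/')[0]
--     # Handle formats like TICKERPRX
--     elif symbol.endswith(('PR', 'PRA', 'PRB', 'PRC', 'PRD', 'PRE', 'PRF', 'PRG', 'PRH', 'PRI', 'PRJ', 'PRK', 'PRL', 'PRM', 'PRN', 'PRO', 'PRP', 'PRQ', 'PRR', 'PRS', 'PRT', 'PRU', 'PRV', 'PRW', 'PRX', 'PRY', 'PRZ')):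
--         # Try to find where the ticker ends and preferred suffix begins
--         for suffix in ['PR', 'PRA', 'PRB', 'PRC', 'PRD', 'PRE', 'PRF', 'PRG', 'PRH', 'PRI', 'PRJ', 'PRK', 'PRL', 'PRM', 'PRN', 'PRO', 'PRP', 'PRQ', 'PRR', 'PRS', 'PRT', 'PRU', 'PRV', 'PRW', 'PRX', 'PRY', 'PRZ']:
--             if symbol.endswith(suffix):
--                 return symbol[:-len(suffix)]
--     return symbol
-- ===== SOURCE B (Python) =====
-- def extract_ticker_from_symbol(symbol):
--     """Extract the base ticker from symbols like 'WFC/PRL' or 'BAC/PRL'."""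
--     if '/' in symbol:
--         return symbol.split('/')[0]
--     # The preferred suffix is 'PR' optionally followed by one capital letter:
--     # check the last characters directly instead of scanning a 27-entry table.
--     if len(symbol) >= 3 and symbol[-3:-1] == 'PR' and 'A' <= symbol[-1] <= 'Z':
--         return symbol[:-3]
--     if symbol[-2:] == 'PR':
--         return symbol[:-2]
--     return symbol
-- ===== Notes on version B (the rewrite author's own statement) =====
-- stated objective: simpler
-- what changed: The 27-entry suffix table ('PR','PRA',...,'PRZ') and the endswith-tuple guard plus first-match scan are replaced by direct checks of the last characters: strip 3 if the string ends in 'PR' plus one capital letter, strip 2 if it ends in 'PR'; the '/' branch is unchanged.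
import Mathlib
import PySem

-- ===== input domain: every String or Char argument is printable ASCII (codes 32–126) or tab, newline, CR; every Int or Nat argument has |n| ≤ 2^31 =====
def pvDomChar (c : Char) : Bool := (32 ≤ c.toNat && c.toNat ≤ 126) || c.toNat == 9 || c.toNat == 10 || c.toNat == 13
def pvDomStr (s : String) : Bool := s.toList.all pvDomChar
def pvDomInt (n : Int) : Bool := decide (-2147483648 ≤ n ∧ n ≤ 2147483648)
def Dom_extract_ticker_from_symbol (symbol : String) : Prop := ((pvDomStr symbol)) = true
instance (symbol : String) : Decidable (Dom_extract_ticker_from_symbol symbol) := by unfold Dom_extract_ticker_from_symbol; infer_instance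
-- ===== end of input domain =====

-- B replaces A's 27-entry suffix table and its scan by direct checks of the last
-- three characters ('PR' optionally followed by one capital letter); objective: simpler.

-- ===== PORT A =====
-- the constant suffix table A scans ('PR', 'PRA', …, 'PRZ'), as lists of chars
def pvSuffixes : List (List Char) :=
  [['P','R'],
   ['P','R','A'],['P','R','B'],['P','R','C'],['P','R','D'],['P','R','E'],['P','R','F'],
   ['P','R','G'],['P','R','H'],['P','R','I'],['P','R','J'],['P','R','K'],['P','R','L'],
   ['P','R','M'],['P','R','N'],['P','R','O'],['P','R','P'],['P','R','Q'],['P','R','R'],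
   ['P','R','S'],['P','R','T'],['P','R','U'],['P','R','V'],['P','R','W'],['P','R','X'],
   ['P','R','Y'],['P','R','Z']]

-- A's for-loop: first suffix with symbol.endswith(suffix) → symbol[:-len(suffix)]
def pvFindSuffix (cs : List Char) : List (List Char) → Option (List Char)
  | [] => none
  | suf :: rest =>
    if PySem.Chars.endswith cs suf then
      some (PySem.Chars.slice cs none (some (-(suf.length : Int))))
    else pvFindSuffix cs rest

def extract_ticker_from_symbol (symbol : String) : String :=
  if PySem.Chars.isIn ['/'] symbol.toList then
    -- symbol.split('/')[0]: split with a nonempty separator always has a first piece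
    String.ofList ((PySem.Chars.splitOn symbol.toList ['/']).headD [])
  else if pvSuffixes.any (fun suf => PySem.Chars.endswith symbol.toList suf) then
    match pvFindSuffix symbol.toList pvSuffixes with
    | some r => String.ofList r
    | none => symbol        -- loop fell through: final 'return symbol'
  else symbol

-- ===== PORT B =====
def extract_ticker_from_symbol_alt (symbol : String) : String :=
  if PySem.Chars.isIn ['/'] symbol.toList then
    String.ofList ((PySem.Chars.splitOn symbol.toList ['/']).headD [])
  else if 3 ≤ symbol.toList.length ∧
          PySem.Chars.slice symbol.toList (some (-3)) (some (-1)) = ['P','R'] ∧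
          -- 'A' <= symbol[-1] <= 'Z'; symbol[-1] exists since len(symbol) >= 3
          (PySem.Chars.pyGet? symbol.toList (-1)).any (fun c => 'A' ≤ c && c ≤ 'Z') = true then
    String.ofList (PySem.Chars.slice symbol.toList none (some (-3)))
  else if PySem.Chars.slice symbol.toList (some (-2)) none = ['P','R'] then
    String.ofList (PySem.Chars.slice symbol.toList none (some (-2)))
  else symbol

-- ===== PRECONDITION & SPEC =====
def Spec_extract_ticker_from_symbol (symbol : String) (out : String) : Prop := out = extract_ticker_from_symbol_alt symbol
instance (symbol : String) (out : String) : Decidable (Spec_extract_ticker_from_symbol symbol out) := by unfold Spec_extract_ticker_from_symbol; infer_instance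

-- ===== CLAIM (what is proved, stated in full; the proofs are below) =====
def Claim_equal_extract_ticker_from_symbol : Prop := ∀ (symbol : String), Dom_extract_ticker_from_symbol symbol → Spec_extract_ticker_from_symbol symbol (extract_ticker_from_symbol symbol)

-- ===== LEMMAS AND PROOFS =====

def pvLetters : List Char :=
  ['A','B','C','D','E','F','G','H','I','J','K','L','M','N','O','P','Q','R','S','T','U','V','W','X','Y','Z']

theorem pvSuffixes_eq : pvSuffixes = ['P','R'] :: pvLetters.map (fun l => ['P','R',l]) := rfl

theorem pvMem_letters (c : Char) : c ∈ pvLetters ↔ ('A' ≤ c ∧ c ≤ 'Z') := by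
  constructor
  · intro h
    fin_cases h <;> exact ⟨by decide, by decide⟩
  · intro ⟨h1, h2⟩
    simp only [Char.le_def, UInt32.le_iff_toNat_le] at h1 h2
    have h1' : 65 ≤ c.toNat := h1
    have h2' : c.toNat ≤ 90 := h2
    rw [← Char.ofNat_toNat c]
    interval_cases hk : c.toNat <;> decide

-- endswith on a reversed cons: suffix test = prefix test on the reverse
theorem pvEndswith_rev (r suf : List Char) :
    PySem.Chars.endswith r.reverse suf = true ↔ suf.reverse <+: r := by
  rw [PySem.Chars.endswith_iff, ← List.reverse_prefix, List.reverse_reverse]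

theorem pvEnds2 (c1 c2 c3 : Char) (rest : List Char) :
    PySem.Chars.endswith (c1 :: c2 :: c3 :: rest).reverse ['P','R'] = true ↔ (c2 = 'P' ∧ c1 = 'R') := by
  rw [pvEndswith_rev]
  simp [List.cons_prefix_cons, eq_comm]
  tauto

theorem pvEnds3 (c1 c2 c3 l : Char) (rest : List Char) :
    PySem.Chars.endswith (c1 :: c2 :: c3 :: rest).reverse ['P','R',l] = true ↔
      (c3 = 'P' ∧ c2 = 'R' ∧ c1 = l) := by
  rw [pvEndswith_rev]
  simp [List.cons_prefix_cons, eq_comm]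
  tauto

-- the loop over the 3-char suffixes, characterized
theorem pvFind3 (c1 c2 c3 : Char) (rest : List Char) (ls : List Char) :
    pvFindSuffix (c1 :: c2 :: c3 :: rest).reverse (ls.map (fun l => ['P','R',l])) =
      if c3 = 'P' ∧ c2 = 'R' ∧ c1 ∈ ls then
        some (PySem.Chars.slice (c1 :: c2 :: c3 :: rest).reverse none (some (-3)))
      else none := by
  induction ls with
  | nil => simp [pvFindSuffix]
  | cons l ls ih =>
    simp only [List.map_cons, pvFindSuffix]
    by_cases h : c3 = 'P' ∧ c2 = 'R' ∧ c1 = l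
    · rw [if_pos ((pvEnds3 c1 c2 c3 l rest).mpr h), if_pos ⟨h.1, h.2.1, by simp [h.2.2]⟩]
      norm_num
    · rw [if_neg (fun hh => h ((pvEnds3 c1 c2 c3 l rest).mp hh)), ih]
      by_cases h' : c3 = 'P' ∧ c2 = 'R' ∧ c1 ∈ ls
      · rw [if_pos h', if_pos ⟨h'.1, h'.2.1, List.mem_cons_of_mem _ h'.2.2⟩]
      · rw [if_neg h', if_neg]
        intro ⟨ha, hb, hc⟩
        rcases List.mem_cons.mp hc with hc | hc
        · exact h ⟨ha, hb, hc⟩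
        · exact h' ⟨ha, hb, hc⟩

-- A's guard: some suffix of the table matches
theorem pvGuard (c1 c2 c3 : Char) (rest : List Char) :
    (pvSuffixes.any (fun suf => PySem.Chars.endswith (c1 :: c2 :: c3 :: rest).reverse suf) = true) ↔
      ((c2 = 'P' ∧ c1 = 'R') ∨ (c3 = 'P' ∧ c2 = 'R' ∧ c1 ∈ pvLetters)) := by
  rw [pvSuffixes_eq]
  simp only [List.any_cons, List.any_map, Bool.or_eq_true, List.any_eq_true, Function.comp]
  rw [pvEnds2]
  constructor
  · rintro (h | ⟨l, hl, h⟩)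
    · exact Or.inl h
    · exact Or.inr ⟨((pvEnds3 c1 c2 c3 l rest).mp h).1, ((pvEnds3 c1 c2 c3 l rest).mp h).2.1,
        ((pvEnds3 c1 c2 c3 l rest).mp h).2.2 ▸ hl⟩
  · rintro (h | ⟨h1, h2, h3⟩)
    · exact Or.inl h
    · exact Or.inr ⟨c1, h3, (pvEnds3 c1 c2 c3 c1 rest).mpr ⟨h1, h2, rfl⟩⟩

-- A's whole loop, characterized
theorem pvFindAll (c1 c2 c3 : Char) (rest : List Char) :
    pvFindSuffix (c1 :: c2 :: c3 :: rest).reverse pvSuffixes =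
      if c2 = 'P' ∧ c1 = 'R' then
        some (PySem.Chars.slice (c1 :: c2 :: c3 :: rest).reverse none (some (-2)))
      else if c3 = 'P' ∧ c2 = 'R' ∧ c1 ∈ pvLetters then
        some (PySem.Chars.slice (c1 :: c2 :: c3 :: rest).reverse none (some (-3)))
      else none := by
  rw [pvSuffixes_eq]
  show (if PySem.Chars.endswith _ ['P','R'] then _ else _) = _
  by_cases h : c2 = 'P' ∧ c1 = 'R'
  · rw [if_pos ((pvEnds2 c1 c2 c3 rest).mpr h), if_pos h]
    norm_num
  · rw [if_neg (fun hh => h ((pvEnds2 c1 c2 c3 rest).mp hh)), if_neg h, pvFind3]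

-- slice computations on a list whose last three characters are a, b, c
theorem pvSlice_to2 (R : List Char) (a b c : Char) :
    PySem.Chars.slice (R ++ [a,b,c]) none (some (-2)) = R ++ [a] := by
  simp only [PySem.Chars.slice_eq_listSlice]
  rw [PySem.List.slice_to_neg_ofNat _ 2 (by omega)]
  have h : (R ++ [a,b,c]).length - 2 = R.length + 1 := by simp
  rw [h]; simp [List.take_append]

theorem pvSlice_to3 (R : List Char) (a b c : Char) :
    PySem.Chars.slice (R ++ [a,b,c]) none (some (-3)) = R := by
  simp only [PySem.Chars.slice_eq_listSlice]
  rw [PySem.List.slice_to_neg_ofNat _ 3 (by omega)]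
  have h : (R ++ [a,b,c]).length - 3 = R.length := by simp
  rw [h]; simp

theorem pvSlice_from2 (R : List Char) (a b c : Char) :
    PySem.Chars.slice (R ++ [a,b,c]) (some (-2)) none = [b,c] := by
  simp only [PySem.Chars.slice_eq_listSlice]
  rw [PySem.List.slice_from_neg_ofNat _ 2 (by omega)]
  have h : (R ++ [a,b,c]).length - 2 = R.length + 1 := by simp
  rw [h]; simp [List.drop_append]

theorem pvSlice_mid (R : List Char) (a b c : Char) :
    PySem.Chars.slice (R ++ [a,b,c]) (some (-3)) (some (-1)) = [a,b] := by
  simp only [PySem.Chars.slice_eq_listSlice]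
  have h1 : PySem.List.clampIdx (R ++ [a,b,c]).length (-3) = R.length := by
    simp [PySem.List.clampIdx]
  have h2 : PySem.List.clampIdx (R ++ [a,b,c]).length (-1) = R.length + 2 := by
    simp only [PySem.List.clampIdx, List.length_append, List.length_cons, List.length_nil]
    split_ifs <;> omega
  simp only [PySem.List.slice, h1, h2]
  rw [List.drop_left]
  have h3 : R.length + 2 - R.length = 2 := by omega
  rw [h3]; rfl

theorem pvGet_last (R : List Char) (a b c : Char) :
    PySem.Chars.pyGet? (R ++ [a,b,c]) (-1) = some c := by
  simp [PySem.List.pyGet?, PySem.List.pyIdx?]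

-- ===== VERDICT (by name: the statement is the Claim_ definition above) =====
theorem extract_ticker_from_symbol_spec : Claim_equal_extract_ticker_from_symbol := by
  intro symbol _
  unfold Spec_extract_ticker_from_symbol extract_ticker_from_symbol extract_ticker_from_symbol_alt
  by_cases hs : PySem.Chars.isIn ['/'] symbol.toList
  · simp only [hs, if_true]
  · simp only [hs, if_false, Bool.false_eq_true]
    obtain ⟨r, hr⟩ : ∃ r, symbol.toList.reverse = r := ⟨_, rfl⟩
    have hcs : symbol.toList = r.reverse := by rw [← hr, List.reverse_reverse]
    rcases r with _ | ⟨c1, _ | ⟨c2, _ | ⟨c3, rest⟩⟩⟩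
    · -- empty string
      simp only [List.reverse_nil] at hcs
      rw [hcs]
      simp [pvSuffixes, PySem.Chars.endswith, List.isSuffixOf,
            PySem.Chars.slice_eq_listSlice, PySem.List.slice, PySem.List.clampIdx,
            PySem.List.pyGet?, PySem.List.pyIdx?]
    · -- one character
      rw [hcs]
      simp [pvSuffixes, PySem.Chars.endswith, List.isSuffixOf, List.isPrefixOf,
            PySem.Chars.slice_eq_listSlice, PySem.List.slice, PySem.List.clampIdx,
            PySem.List.pyGet?, PySem.List.pyIdx?]
    · -- two characters: only the bare 'PR' suffix can match
      rw [hcs]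
      by_cases hP : c2 = 'P' <;> by_cases hR : c1 = 'R' <;>
        simp [hP, hR, pvSuffixes, pvFindSuffix, PySem.Chars.endswith, List.isSuffixOf,
              List.isPrefixOf, PySem.Chars.slice_eq_listSlice, PySem.List.slice,
              PySem.List.clampIdx, PySem.List.pyGet?, PySem.List.pyIdx?] <;>
        intros <;> exfalso <;> subst_vars <;> simp_all
    · -- at least three characters
      have hspl : (c1 :: c2 :: c3 :: rest).reverse = rest.reverse ++ [c3, c2, c1] := by simp
      have hguard := pvGuard c1 c2 c3 rest
      have hfind := pvFindAll c1 c2 c3 rest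
      rw [hcs]
      rw [hspl] at hguard hfind ⊢
      rw [pvSlice_to2, pvSlice_to3] at hfind
      rw [pvSlice_mid, pvSlice_from2, pvGet_last, pvSlice_to2, pvSlice_to3]
      by_cases hG2 : c2 = 'P' ∧ c1 = 'R'
      · -- the bare 'PR' suffix matches (then the three-char test cannot)
        rw [if_pos (hguard.mpr (Or.inl hG2)), hfind, if_pos hG2]
        have hno3 : ¬ (3 ≤ (rest.reverse ++ [c3, c2, c1]).length ∧ ([c3, c2] : List Char) = ['P','R'] ∧
            (some c1).any (fun c => 'A' ≤ c && c ≤ 'Z') = true) := by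
          rintro ⟨-, hx, -⟩
          simp only [List.cons.injEq, and_true] at hx
          rw [hG2.1] at hx
          exact absurd hx.2 (by decide)
        rw [if_neg hno3, if_pos (by simp [hG2.1, hG2.2])]
      · by_cases hG3 : c3 = 'P' ∧ c2 = 'R' ∧ ('A' ≤ c1 ∧ c1 ≤ 'Z')
        · have hmem : c3 = 'P' ∧ c2 = 'R' ∧ c1 ∈ pvLetters :=
            ⟨hG3.1, hG3.2.1, (pvMem_letters c1).mpr hG3.2.2⟩
          rw [if_pos (hguard.mpr (Or.inr hmem)), hfind, if_neg hG2, if_pos hmem,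
              if_pos ⟨by simp, by simp [hG3.1, hG3.2.1], by simp [hG3.2.2.1, hG3.2.2.2]⟩]
        · have hnG3' : ¬ (c3 = 'P' ∧ c2 = 'R' ∧ c1 ∈ pvLetters) := by
            rintro ⟨ha, hb, hc⟩
            exact hG3 ⟨ha, hb, (pvMem_letters c1).mp hc⟩
          rw [if_neg (fun h => ((hguard.mp h).elim hG2 hnG3'))]
          have hno3 : ¬ (3 ≤ (rest.reverse ++ [c3, c2, c1]).length ∧ ([c3, c2] : List Char) = ['P','R'] ∧
              (some c1).any (fun c => 'A' ≤ c && c ≤ 'Z') = true) := by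
            rintro ⟨-, hx, hy⟩
            simp only [List.cons.injEq, and_true] at hx
            simp only [Option.any_some, Bool.and_eq_true, decide_eq_true_eq] at hy
            exact hG3 ⟨hx.1, hx.2, hy⟩
          rw [if_neg hno3]
          rw [if_neg (fun hx : ([c2, c1] : List Char) = ['P','R'] => by
            simp only [List.cons.injEq, and_true] at hx
            exact hG2 hx)]
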